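-- pv_equiv track=rewrite | github.com/dmalzl/metadatamapping | metadatamapping/parsers.py | parse_soft_metadata
-- ===== SOURCE A (Python) =====
-- from typing import Any, Union, Callable
--
-- def parse_soft_line(line: str) -> tuple[str, str]:
--     """
--     parse line of SOFT formatted metadata
--
--     :param line:    SOFT formatted string
--
--     :return:
--     """
--     key, value = line.split(' = ', maxsplit = 1)
--     return key[1:].replace('\t', ' '), value.replace('\t', ' ')
--
-- def to_list(item: Union[str, list]) -> list[str]:
--     if isinstance(item, list):
--         return item
--
--     return [item]
--
-- def add_missing_keys(
--     metadata_dict: dict[str, str],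
--     retain_keys: dict[str, str]
-- ) -> dict[str, str]:
--     """
--     ensures that all keys in retain_keys are present in the metadata dictionary
--
--     :param metadata_dict:   dictionary containing the GEO metadata
--     :param retain_keys:     dictionary containing the keys to retain
--
--     :return:                metadata_dict with missing keys added (value is N/A)
--     """
--     # values because the retain_keys is a map
--     for key in retain_keys.values():
--         if not key in metadata_dict:
--             metadata_dict[key] = 'N/A'
--
--     return metadata_dict
--
-- def list_values_to_string(metadata_dict: dict[str, Union[str, list[str]]]) -> dict[str, str]:
--     """
--     concatenates those values that are lists to string
--
--     :param metadata_dict:   dictionary containing the GEO metadata possibly with lists of strings as values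
--
--     :return:                metadata_dict with lists of strings concatenated
--     """
--     for key, value in metadata_dict.items():
--         if isinstance(value, list):
--             metadata_dict[key] = ' '.join(value)
--
--     return metadata_dict
--
-- def parse_soft_metadata(
--     soft_metadata: list[str],
--     retain_keys: dict[str, str]
-- ) -> dict[str, str]:
--     """
--     parses a list of SOFT formatted strings and returns a dictionary
--     containing the parsed information. Only retains those the keys contained
--     as keys and replaces them with value in the final result
--     (e.g. retain_keys = {'key': 'other_key'} -> result = {'other_key': <metadata>})
--
--     :param soft_metadata:   list of SOFT formatted strings
--     :param retain_keys:     dictionary containing the keys to retain as keys and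
--                             the renamed key as values. result will contain renamed key
--
--     :return:                dictionary containing the parsed metadatas
--     """
--     metadata_dict = {}
--     for line in soft_metadata:
--         if not line.startswith('!'):
--             continue
--
--         key, value = parse_soft_line(line)
--         if key not in retain_keys:
--             continue
--
--         key = retain_keys[key]
--
--         if key in metadata_dict:
--             tmp = to_list(metadata_dict[key])
--             tmp.append(value)
--             metadata_dict[key] = tmp
--
--         else:
--             metadata_dict[key] = value
--
--     metadata_dict = list_values_to_string(metadata_dict)
--     metadata_dict = add_missing_keys(
--         metadata_dict,
--         retain_keys
--     )
--
--     return metadata_dict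
-- ===== SOURCE B (Python) =====
-- # B: two-stage group-by — flatten the lines once into a list of (renamed key, value)
-- # pairs, then build the result dict by filtering that pair list per distinct key;
-- # no dict accumulation during the line loop. Return-value equivalence only.
-- def parse_soft_metadata(soft_metadata, retain_keys):
--     pairs = []
--     for line in soft_metadata:
--         if not line.startswith('!'):
--             continue
--         key, value = line.split(' = ', maxsplit=1)
--         key = key[1:].replace('\t', ' ')
--         if key in retain_keys:
--             pairs.append((retain_keys[key], value.replace('\t', ' ')))
--     result = {
--         key: ' '.join(value for k, value in pairs if k == key)
--         for key in dict.fromkeys(k for k, _ in pairs)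
--     }
--     for key in retain_keys.values():
--         result.setdefault(key, 'N/A')
--     return result
-- ===== Notes on version B (the rewrite author's own statement) =====
-- stated objective: alternative
-- what changed: B replaces A's incremental dict with str/list union values (isinstance branching plus a list_values_to_string fixup pass) by a two-stage group-by: it first flattens the lines into a plain list of (renamed key, value) pairs, then builds the result in one comprehension by filtering that pair list per distinct first-seen key, joining with ' '.
import Mathlib
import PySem

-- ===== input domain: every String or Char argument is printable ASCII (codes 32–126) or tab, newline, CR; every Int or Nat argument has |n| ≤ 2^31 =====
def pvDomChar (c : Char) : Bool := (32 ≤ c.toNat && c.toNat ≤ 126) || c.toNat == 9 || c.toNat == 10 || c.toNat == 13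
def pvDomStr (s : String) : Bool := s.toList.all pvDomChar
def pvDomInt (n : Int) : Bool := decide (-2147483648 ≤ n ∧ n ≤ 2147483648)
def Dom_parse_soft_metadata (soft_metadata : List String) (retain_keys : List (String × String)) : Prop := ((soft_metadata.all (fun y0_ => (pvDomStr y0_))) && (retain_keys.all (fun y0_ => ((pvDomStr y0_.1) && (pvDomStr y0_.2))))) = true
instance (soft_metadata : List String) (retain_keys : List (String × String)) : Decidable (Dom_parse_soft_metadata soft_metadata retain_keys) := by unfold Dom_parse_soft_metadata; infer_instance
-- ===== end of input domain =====

-- B replaces A's incremental dict of str/list union values (isinstance branching + fixup pass)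
-- by a two-stage group-by: flatten the lines to a list of (renamed key, value) pairs,
-- then build the result by filtering that pair list per distinct first-seen key.

-- ===== PORT A =====
-- helper parse_soft_line: line.split(' = ', maxsplit=1); none = ValueError (no ' = ' in line)
def pvParseSoftLineA (line : String) : Option (String × String) :=
  match PySem.Str.splitMax? line " = " 1 with
  | some [k, v] =>
      some (PySem.Str.replace (PySem.Str.slice k (some 1) none) "\t" " ",
            PySem.Str.replace v "\t" " ")
  | _ => none

-- helper to_list
def pvToListA : String ⊕ List String → List String
  | .inl s => [s]
  | .inr l => l

-- one iteration of A's line loop (value type String ⊕ List String models Python's str/list union)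
def pvStepA (rk : PySem.Dict String String)
    (d : PySem.Dict String (String ⊕ List String)) (line : String) :
    PySem.Dict String (String ⊕ List String) :=
  if PySem.Str.startswith line "!" then
    match pvParseSoftLineA line with
    | some (key, value) =>
        if rk.contains key then
          let key := rk.getD key ""
          match d.get? key with
          | some old => d.insert key (.inr (pvToListA old ++ [value]))
          | none => d.insert key (.inl value)
        else d
    | none => d  -- Python raises ValueError here; such inputs are excluded by Pre_
  else d

-- helper list_values_to_string: in-place update over items()
def pvListValuesToStringA (d : PySem.Dict String (String ⊕ List String)) :
    PySem.Dict String (String ⊕ List String) :=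
  d.items.foldl (fun acc p =>
    match p.2 with
    | .inr xs => acc.insert p.1 (.inl (PySem.Str.join " " xs))
    | .inl _ => acc) d

-- helper add_missing_keys
def pvAddMissingKeysA (d : PySem.Dict String (String ⊕ List String))
    (rk : PySem.Dict String String) : PySem.Dict String (String ⊕ List String) :=
  rk.values.foldl (fun acc k =>
    if acc.contains k then acc else acc.insert k (.inl "N/A")) d

def parse_soft_metadata (soft_metadata : List String) (retain_keys : List (String × String)) : List (String × String) :=
  -- Python's dict[str, str] result; .inr is gone after list_values_to_string
  (pvAddMissingKeysA
      (pvListValuesToStringA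
        (soft_metadata.foldl (pvStepA (PySem.Dict.ofList retain_keys)) PySem.Dict.empty))
      (PySem.Dict.ofList retain_keys)).items.map
    (fun p => (p.1, Sum.elim id (PySem.Str.join " ") p.2))

-- ===== PORT B =====
-- one iteration of B's line loop: pairs.append((retain_keys[key], value))
def pvPairsStep (rk : PySem.Dict String String)
    (acc : List (String × String)) (line : String) : List (String × String) :=
  if PySem.Str.startswith line "!" then
    match PySem.Str.splitMax? line " = " 1 with
    | some [k, v] =>
        let key := PySem.Str.replace (PySem.Str.slice k (some 1) none) "\t" " "
        if rk.contains key then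
          acc ++ [(rk.getD key "", PySem.Str.replace v "\t" " ")]
        else acc
    | _ => acc  -- Python raises ValueError here; such inputs are excluded by Pre_
  else acc

-- ' '.join(value for k, value in pairs if k == key)
def pvGroupJoin (pairs : List (String × String)) (key : String) : String :=
  PySem.Str.join " " ((pairs.filter (fun p => p.1 == key)).map (·.2))

def parse_soft_metadata_alt (soft_metadata : List String) (retain_keys : List (String × String)) : List (String × String) :=
  let rk := PySem.Dict.ofList retain_keys
  let pairs := soft_metadata.foldl (pvPairsStep rk) []
  -- {key: ' '.join(…) for key in dict.fromkeys(k for k, _ in pairs)}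
  let result := PySem.Dict.mk
    ((PySem.List.dedup (pairs.map (·.1))).map (fun key => (key, pvGroupJoin pairs key)))
  -- for key in retain_keys.values(): result.setdefault(key, 'N/A')
  (rk.values.foldl (fun r key => r.setdefault key "N/A") result).items

-- ===== PRECONDITION & SPEC =====
-- Pre_ excludes inputs where a line starts with '!' but contains no ' = ': there
-- A's line.split(' = ', maxsplit=1) yields a single piece and the unpacking raises ValueError.
def Pre_parse_soft_metadata (soft_metadata : List String) (retain_keys : List (String × String)) : Prop :=
  ∀ line ∈ soft_metadata, PySem.Str.startswith line "!" = true → PySem.Str.isIn " = " line = true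
instance (soft_metadata : List String) (retain_keys : List (String × String)) : Decidable (Pre_parse_soft_metadata soft_metadata retain_keys) := by unfold Pre_parse_soft_metadata; infer_instance

def pvWitness_parse_soft_metadata : List String × (List (String × String)) :=
  (["!title = GSM one", "!title = two", "skip me"], [("title", "Title"), ("organism", "Organism")])

def Spec_parse_soft_metadata (soft_metadata : List String) (retain_keys : List (String × String)) (out : List (String × String)) : Prop := out = parse_soft_metadata_alt soft_metadata retain_keys
instance (soft_metadata : List String) (retain_keys : List (String × String)) (out : List (String × String)) : Decidable (Spec_parse_soft_metadata soft_metadata retain_keys out) := by unfold Spec_parse_soft_metadata; infer_instance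

-- ===== CLAIM (what is proved, stated in full; the proofs are below) =====
def Claim_equal_parse_soft_metadata : Prop := ∀ (soft_metadata : List String) (retain_keys : List (String × String)), Dom_parse_soft_metadata soft_metadata retain_keys → Pre_parse_soft_metadata soft_metadata retain_keys → Spec_parse_soft_metadata soft_metadata retain_keys (parse_soft_metadata soft_metadata retain_keys)

-- ===== LEMMAS AND PROOFS =====

-- the values of the pairs whose (renamed) key is k, in order
def pvVals (ps : List (String × String)) (k : String) : List String :=
  (ps.filter (fun p => p.1 == k)).map (·.2)

-- fB maps a B-side value list to the A-side union value it represents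
def pvFB : List String → String ⊕ List String
  | [s] => .inl s
  | l => .inr l

theorem pvToListA_pvFB (vs : List String) : pvToListA (pvFB vs) = vs := by
  match vs with
  | [] => rfl
  | [s] => rfl
  | a :: b :: t => rfl

theorem pvFB_append (vs : List String) (v : String) (h : vs ≠ []) :
    pvFB (vs ++ [v]) = .inr (vs ++ [v]) := by
  match vs with
  | [] => exact absurd rfl h
  | [a] => rfl
  | a :: b :: t => rfl

theorem pvFB_eq_inl {vs : List String} {s : String} (h : pvFB vs = .inl s) : vs = [s] := by
  match vs with
  | [] => simp [pvFB] at h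
  | [a] => simp [pvFB] at h; simp [h]
  | a :: b :: t => simp [pvFB] at h

theorem pvFB_eq_inr {vs xs : List String} (h : pvFB vs = .inr xs) : xs = vs := by
  match vs with
  | [] => simp [pvFB] at h; simp [h]
  | [a] => simp [pvFB] at h
  | a :: b :: t => simp [pvFB] at h; simp [h]

theorem pvVals_append (ps : List (String × String)) (k0 : String) (v0 : String) (k : String) :
    pvVals (ps ++ [(k0, v0)]) k = pvVals ps k ++ (if k0 == k then [v0] else []) := by
  unfold pvVals
  rw [List.filter_append]
  by_cases h : (k0 == k) = true <;> simp [h]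

theorem pvVals_ne_nil_of_mem {ps : List (String × String)} {k : String}
    (h : k ∈ ps.map (·.1)) : pvVals ps k ≠ [] := by
  obtain ⟨p, hp, rfl⟩ := List.mem_map.1 h
  unfold pvVals
  simp only [ne_eq, List.map_eq_nil_iff, List.filter_eq_nil_iff, not_forall]
  exact ⟨p, hp, by simp⟩

theorem pvVals_nil_of_not_mem {ps : List (String × String)} {k : String}
    (h : k ∉ ps.map (·.1)) : pvVals ps k = [] := by
  unfold pvVals
  simp only [List.map_eq_nil_iff, List.filter_eq_nil_iff]
  intro p hp
  simp only [beq_iff_eq]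
  intro he
  exact h (he ▸ List.mem_map_of_mem hp)

theorem pvDedup_append_singleton (l : List String) (x : String) :
    PySem.List.dedup (l ++ [x])
      = if x ∈ l then PySem.List.dedup l else PySem.List.dedup l ++ [x] := by
  simp only [PySem.List.dedup_eq_ofList, PySem.Set.ofList_append_singleton,
    PySem.Set.add_eq_ite, PySem.Set.mem_ofList]

-- get? of a grouped dict built as mk (S.map (k, g k))
theorem pvGet_grouped (S : List String) (g : String → String ⊕ List String) (k0 : String) :
    (PySem.Dict.mk (S.map (fun k => (k, g k)))).get? k0
      = if k0 ∈ S then some (g k0) else none := by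
  induction S with
  | nil => simp [PySem.Dict.get?]
  | cons a t ih =>
    simp only [List.map_cons, PySem.Dict.get?_mk_cons, List.mem_cons]
    by_cases h : (a == k0) = true
    · have : k0 = a := (beq_iff_eq.1 h).symm
      simp [h, this]
    · have hne : ¬ k0 = a := fun he => h (beq_iff_eq.2 he.symm)
      simp [h, hne, ih]

theorem pvContains_grouped (S : List String) (g : String → String ⊕ List String) (k0 : String) :
    (PySem.Dict.mk (S.map (fun k => (k, g k)))).contains k0 = decide (k0 ∈ S) := by
  rw [PySem.Dict.contains_eq_isSome_get?, pvGet_grouped]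
  by_cases h : k0 ∈ S <;> simp [h]

-- insert at an existing key of a grouped dict rewrites just that entry
theorem pvInsert_grouped (S : List String) (g : String → String ⊕ List String)
    (k0 : String) (w : String ⊕ List String) (h : k0 ∈ S) :
    (PySem.Dict.mk (S.map (fun k => (k, g k)))).insert k0 w
      = PySem.Dict.mk (S.map (fun k => (k, if k = k0 then w else g k))) := by
  have hc : (PySem.Dict.mk (S.map (fun k => (k, g k)))).contains k0 = true := by
    rw [pvContains_grouped]; simpa using h
  have := PySem.Dict.items_insert_of_contains (d := PySem.Dict.mk (S.map (fun k => (k, g k))))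
    (k := k0) (v := w) hc
  have hitems : (PySem.Dict.mk (S.map (fun k => (k, g k)))).items
      = S.map (fun k => (k, g k)) := rfl
  cases hmk : (PySem.Dict.mk (S.map (fun k => (k, g k)))).insert k0 w with
  | mk l =>
    congr 1
    have hl : l = ((S.map (fun k => (k, g k))).map
        (fun p => if p.1 == k0 then (k0, w) else p)) := by
      have : (PySem.Dict.mk (S.map (fun k => (k, g k)))).insert k0 w
          = PySem.Dict.mk (((S.map (fun k => (k, g k))).map
              (fun p => if p.1 == k0 then (k0, w) else p))) := by
        cases hins : (PySem.Dict.mk (S.map (fun k => (k, g k)))).insert k0 w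
        congr 1
        have := this
        rw [hitems] at this
        calc _ = ((PySem.Dict.mk (S.map (fun k => (k, g k)))).insert k0 w).items := by
                  rw [hins]
             _ = _ := by rw [this]
      rw [hmk] at this
      cases this; rfl
    rw [hl, List.map_map]
    apply List.map_congr_left
    intro k _
    by_cases hk : k = k0
    · simp [hk]
    · simp [Function.comp_def, hk, beq_iff_eq]

-- one line of A's loop preserves the group-by invariant
theorem pvStep_inv (rk : PySem.Dict String String) (acc : List (String × String)) (line : String) :
    pvStepA rk (PySem.Dict.mk ((PySem.List.dedup (acc.map (·.1))).map
        (fun k => (k, pvFB (pvVals acc k))))) line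
      = PySem.Dict.mk ((PySem.List.dedup ((pvPairsStep rk acc line).map (·.1))).map
          (fun k => (k, pvFB (pvVals (pvPairsStep rk acc line) k)))) := by
  unfold pvStepA pvPairsStep pvParseSoftLineA
  by_cases hs : PySem.Str.startswith line "!" = true
  · simp only [hs, if_pos]
    match hsp : PySem.Str.splitMax? line " = " 1 with
    | none => rfl
    | some [] => rfl
    | some [k] => rfl
    | some (k :: v :: r :: t) => rfl
    | some [k, v] =>
      simp only
      set key := PySem.Str.replace (PySem.Str.slice k (some 1) none) "\t" " " with hkey
      by_cases hrk : rk.contains key = true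
      · simp only [hrk, if_pos]
        set k0 := rk.getD key "" with hk0
        set v0 := PySem.Str.replace v "\t" " " with hv0
        set S := PySem.List.dedup (acc.map (·.1)) with hS
        have hmemS : ∀ x, x ∈ S ↔ x ∈ acc.map (·.1) := by
          intro x; simp [hS, PySem.List.mem_dedup]
        rw [pvGet_grouped]
        have hkeys : (acc ++ [(k0, v0)]).map (·.1) = acc.map (·.1) ++ [k0] := by simp
        by_cases hm : k0 ∈ S
        · rw [if_pos hm]
          simp only [pvToListA_pvFB]
          have hne : pvVals acc k0 ≠ [] := pvVals_ne_nil_of_mem ((hmemS k0).1 hm)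
          rw [pvInsert_grouped _ _ _ _ hm]
          have hS' : PySem.List.dedup ((acc ++ [(k0, v0)]).map (·.1)) = S := by
            rw [hkeys, pvDedup_append_singleton, if_pos ((hmemS k0).1 hm)]
          rw [hS']
          congr 1
          apply List.map_congr_left
          intro x _
          by_cases hx : x = k0
          · subst hx
            simp [pvVals_append, pvFB_append _ _ hne]
          · have : (k0 == x) = false := by simp [beq_iff_eq]; exact fun he => hx he.symm
            simp [hx, pvVals_append, this]
        · rw [if_neg hm]
          have hnm : k0 ∉ acc.map (·.1) := fun h => hm ((hmemS k0).2 h)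
          have hnil : pvVals acc k0 = [] := pvVals_nil_of_not_mem hnm
          have hncon : (PySem.Dict.mk (S.map (fun x => (x, pvFB (pvVals acc x))))).contains k0 = false := by
            rw [pvContains_grouped]; simp [hm]
          have hins := PySem.Dict.items_insert_of_not_contains
            (d := PySem.Dict.mk (S.map (fun x => (x, pvFB (pvVals acc x)))))
            (k := k0) (v := Sum.inl v0) hncon
          have hS' : PySem.List.dedup ((acc ++ [(k0, v0)]).map (·.1)) = S ++ [k0] := by
            rw [hkeys, pvDedup_append_singleton, if_neg hnm]
          have hncon' : ¬ (PySem.Dict.mk (S.map (fun x => (x, pvFB (pvVals acc x))))).contains k0 = true := by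
            rw [hncon]; simp
          show (PySem.Dict.mk (S.map (fun x => (x, pvFB (pvVals acc x))))).insert k0 (Sum.inl v0) = _
          simp only [PySem.Dict.insert, if_neg hncon', PySem.Dict.items]
          rw [hS']
          congr 1
          rw [List.map_append]
          congr 1
          · apply List.map_congr_left
            intro x hx
            have hxne : x ≠ k0 := fun he => hm (he ▸ hx)
            have : (k0 == x) = false := by simp [beq_iff_eq]; exact fun he => hxne he.symm
            simp [pvVals_append, this]
          · simp [pvVals_append, hnil, pvFB]
      · simp only [hrk]; rfl
  · simp only [hs]; rfl

-- the whole line loop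
theorem pvLoop_inv (rk : PySem.Dict String String) (lines : List String) :
    ∀ (acc : List (String × String)),
    lines.foldl (pvStepA rk) (PySem.Dict.mk ((PySem.List.dedup (acc.map (·.1))).map
        (fun k => (k, pvFB (pvVals acc k)))))
      = PySem.Dict.mk ((PySem.List.dedup ((lines.foldl (pvPairsStep rk) acc).map (·.1))).map
          (fun k => (k, pvFB (pvVals (lines.foldl (pvPairsStep rk) acc) k)))) := by
  induction lines with
  | nil => intro acc; rfl
  | cons line rest ih =>
    intro acc
    simp only [List.foldl_cons, pvStep_inv rk acc line]
    exact ih (pvPairsStep rk acc line)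

-- the key of the middle entry of a Nodup-keys item list occurs in neither side
theorem pvKeysplit (k : String) (vs : List String) (l1 tl : List (String × List String))
    (hnd : ((l1 ++ (k, vs) :: tl).map (·.1)).Nodup) :
    (k ∉ l1.map (·.1)) ∧ k ∉ tl.map (·.1) := by
  simp [List.nodup_append] at hnd
  constructor
  · intro hm
    obtain ⟨⟨a, x⟩, hp, heq⟩ := List.mem_map.1 hm
    exact (hnd.2.2 a x hp).1 heq
  · intro hm
    obtain ⟨⟨a, x⟩, hp, heq⟩ := List.mem_map.1 hm
    subst heq
    exact hnd.2.1.1 x hp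

-- inserting at the unique occurrence of a key rewrites just that entry
theorem pvInsert_mid {β : Type} (L1 L2 : List (String × β)) (k : String) (v w : β)
    (h1 : ∀ p ∈ L1, p.1 ≠ k) (h2 : ∀ p ∈ L2, p.1 ≠ k) :
    (PySem.Dict.mk (L1 ++ (k, v) :: L2)).insert k w = PySem.Dict.mk (L1 ++ (k, w) :: L2) := by
  have hc : (PySem.Dict.mk (L1 ++ (k, v) :: L2)).contains k = true := by
    simp [PySem.Dict.contains]
  simp only [PySem.Dict.insert, hc, if_pos]
  congr 1
  simp only [PySem.Dict.items, List.map_append, List.map_cons, BEq.rfl, if_pos]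
  congr 1
  · rw [List.map_congr_left (g := id) (by intro p hp; simp [h1 p hp]), List.map_id]
  · congr 1
    rw [List.map_congr_left (g := id) (by intro p hp; simp [h2 p hp]), List.map_id]

-- A's list_values_to_string pass over the pvFB-image joins every value list
theorem pvStr_loop (l2 : List (String × List String)) :
    ∀ (l1 : List (String × List String)),
    (((l1 ++ l2).map (·.1)).Nodup) →
    ((l2.map (fun p => (p.1, pvFB p.2))).foldl
        (fun acc p => match p.2 with
          | .inr xs => acc.insert p.1 (.inl (PySem.Str.join " " xs))
          | .inl _ => acc)
        (PySem.Dict.mk (l1.map (fun p => (p.1, Sum.inl (PySem.Str.join " " p.2)))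
                        ++ l2.map (fun p => (p.1, pvFB p.2)))))
      = PySem.Dict.mk ((l1 ++ l2).map (fun p => (p.1, Sum.inl (PySem.Str.join " " p.2)))) := by
  induction l2 with
  | nil => intro l1 _; simp
  | cons hd tl ih =>
    intro l1 hnd
    obtain ⟨k, vs⟩ := hd
    simp only [List.map_cons, List.foldl_cons]
    cases hfb : pvFB vs with
    | inl s =>
      have hvs : vs = [s] := pvFB_eq_inl hfb
      have hjoin : PySem.Str.join " " vs = s := by
        subst hvs; simp [PySem.Str.join, PySem.Chars.join_singleton]
      have hrw : (PySem.Dict.mk (l1.map (fun p => (p.1, Sum.inl (PySem.Str.join " " p.2)))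
                   ++ (k, Sum.inl s) :: tl.map (fun p => (p.1, pvFB p.2))))
               = (PySem.Dict.mk ((l1 ++ [(k, vs)]).map (fun p => (p.1, Sum.inl (PySem.Str.join " " p.2)))
                   ++ tl.map (fun p => (p.1, pvFB p.2)))) := by
        simp only [List.map_append, List.map_cons, List.map_nil, List.append_assoc,
          List.cons_append, List.nil_append, hjoin]
      rw [hrw]
      have := ih (l1 ++ [(k, vs)]) (by simpa using hnd)
      simpa using this
    | inr xs =>
      have hxs : xs = vs := pvFB_eq_inr hfb
      rw [hxs]
      obtain ⟨hkl1, hktl⟩ := pvKeysplit k vs l1 tl hnd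
      have hk1 : ∀ p ∈ l1.map (fun p => (p.1, (Sum.inl (PySem.Str.join " " p.2) : String ⊕ List String))), p.1 ≠ k := by
        intro p hp
        obtain ⟨q, hq, rfl⟩ := List.mem_map.1 hp
        intro heq; exact hkl1 (heq ▸ List.mem_map_of_mem hq)
      have hk2 : ∀ p ∈ tl.map (fun p => (p.1, pvFB p.2)), p.1 ≠ k := by
        intro p hp
        obtain ⟨q, hq, rfl⟩ := List.mem_map.1 hp
        intro heq; exact hktl (heq ▸ List.mem_map_of_mem hq)
      have hins := pvInsert_mid (L1 := l1.map (fun p => (p.1, Sum.inl (PySem.Str.join " " p.2))))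
          (L2 := tl.map (fun p => (p.1, pvFB p.2))) k (Sum.inr vs)
          (Sum.inl (PySem.Str.join " " vs)) hk1 hk2
      simp only
      rw [hins]
      have hrw : (PySem.Dict.mk (l1.map (fun p => (p.1, Sum.inl (PySem.Str.join " " p.2)))
                   ++ (k, Sum.inl (PySem.Str.join " " vs)) :: tl.map (fun p => (p.1, pvFB p.2))))
               = (PySem.Dict.mk ((l1 ++ [(k, vs)]).map (fun p => (p.1, Sum.inl (PySem.Str.join " " p.2)))
                   ++ tl.map (fun p => (p.1, pvFB p.2)))) := by
        simp only [List.map_append, List.map_cons, List.map_nil, List.append_assoc,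
          List.cons_append, List.nil_append]
      rw [hrw]
      have := ih (l1 ++ [(k, vs)]) (by simpa using hnd)
      simpa using this

-- generic value-map lemmas: a Dict whose items are l.map (fun p => (p.1, f p.2))
theorem pvMapv_contains {β γ : Type} (f : β → γ) (l : List (String × β)) (k : String) :
    (PySem.Dict.mk (l.map (fun p => (p.1, f p.2)))).contains k
      = (PySem.Dict.mk l).contains k := by
  simp [PySem.Dict.contains, List.any_map, Function.comp_def]

theorem pvMapv_insert {β γ : Type} (f : β → γ) (l : List (String × β)) (k : String) (w : β) :
    (PySem.Dict.mk (l.map (fun p => (p.1, f p.2)))).insert k (f w)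
      = PySem.Dict.mk (((PySem.Dict.mk l).insert k w).items.map (fun p => (p.1, f p.2))) := by
  have hc := pvMapv_contains f l k
  by_cases h : (PySem.Dict.mk l).contains k = true
  · have h' : (PySem.Dict.mk (l.map (fun p => (p.1, f p.2)))).contains k = true := hc.trans h
    simp only [PySem.Dict.insert, h, h', if_pos, PySem.Dict.items, List.map_map]
    congr 1
    apply List.map_congr_left
    intro p _
    by_cases hk : p.1 = k <;> simp [hk]
  · have h' : ¬ (PySem.Dict.mk (l.map (fun p => (p.1, f p.2)))).contains k = true := by
      rw [hc]; exact h
    simp only [PySem.Dict.insert, if_neg h, if_neg h', PySem.Dict.items, List.map_append,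
      List.map_cons, List.map_nil]

-- the add_missing_keys loops agree (A's dict is the Sum.inl-image of B's setdefault loop)
theorem pvMiss_loop (ks : List String) :
    ∀ (r : PySem.Dict String String),
    ks.foldl (fun acc k => if acc.contains k then acc else acc.insert k ((.inl "N/A" : String ⊕ List String)))
        (PySem.Dict.mk (r.items.map (fun p => (p.1, (Sum.inl p.2 : String ⊕ List String)))))
      = PySem.Dict.mk ((ks.foldl (fun r key => r.setdefault key "N/A") r).items.map
          (fun p => (p.1, (Sum.inl p.2 : String ⊕ List String)))) := by
  induction ks with
  | nil => intro r; rfl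
  | cons k tl ih =>
    intro r
    simp only [List.foldl_cons]
    rw [show (PySem.Dict.mk (r.items.map (fun p => (p.1, Sum.inl p.2)))).contains k
          = r.contains k from by
        have := pvMapv_contains (Sum.inl : String → String ⊕ List String) r.items k
        cases r; exact this]
    by_cases hc : r.contains k = true
    · simp only [PySem.Dict.setdefault_of_contains r _ hc, hc, if_pos]
      exact ih r
    · have hnc : r.contains k = false := by simpa using hc
      simp only [hc, Bool.false_eq_true, if_false,
        PySem.Dict.setdefault_of_not_contains r _ hnc]
      have := pvMapv_insert (Sum.inl : String → String ⊕ List String) r.items k "N/A"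
      rw [show (PySem.Dict.mk (r.items.map (fun p => (p.1, Sum.inl p.2)))).insert k (Sum.inl "N/A")
            = PySem.Dict.mk ((r.insert k "N/A").items.map (fun p => (p.1, Sum.inl p.2))) from by
          cases r; exact this]
      exact ih (r.insert k "N/A")

-- ===== VERDICT (by name: the statement is the Claim_ definition above) =====
theorem parse_soft_metadata_spec : Claim_equal_parse_soft_metadata := by
  intro soft_metadata retain_keys _ _
  unfold Spec_parse_soft_metadata parse_soft_metadata parse_soft_metadata_alt
  generalize PySem.Dict.ofList retain_keys = rk
  have hloop := pvLoop_inv rk soft_metadata []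
  simp only [List.map_nil] at hloop
  simp only [List.map_nil]
  set pairs := soft_metadata.foldl (pvPairsStep rk) [] with hpairs
  set S := PySem.List.dedup (pairs.map (·.1)) with hSdef
  have hSnodup : S.Nodup := PySem.List.nodup_dedup _
  rw [show (PySem.Dict.empty : PySem.Dict String (String ⊕ List String))
        = PySem.Dict.mk ((PySem.List.dedup ([] : List String)).map
            (fun k => (k, pvFB (pvVals [] k)))) from rfl, hloop]
  -- A's loop result is the pvFB-image of the grouped list
  have himg : S.map (fun k => (k, pvFB (pvVals pairs k)))
      = (S.map (fun k => (k, pvVals pairs k))).map (fun p => (p.1, pvFB p.2)) := by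
    simp [List.map_map, Function.comp_def]
  unfold pvListValuesToStringA
  rw [show (PySem.Dict.mk (S.map (fun k => (k, pvFB (pvVals pairs k))))).items
        = S.map (fun k => (k, pvFB (pvVals pairs k))) from rfl]
  rw [himg]
  have hstr := pvStr_loop (S.map (fun k => (k, pvVals pairs k))) []
    (by simpa [List.map_map, Function.comp_def] using hSnodup)
  simp only [List.nil_append, List.map_nil] at hstr
  rw [hstr]
  -- the joined grouped list is the Sum.inl-image of B's comprehension dict
  have hres : (S.map (fun k => (k, pvVals pairs k))).map
        (fun p => (p.1, (Sum.inl (PySem.Str.join " " p.2) : String ⊕ List String)))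
      = (PySem.Dict.mk (S.map (fun key => (key, pvGroupJoin pairs key)))).items.map
          (fun p => (p.1, (Sum.inl p.2 : String ⊕ List String))) := by
    simp [List.map_map, Function.comp_def, pvGroupJoin, pvVals]
  unfold pvAddMissingKeysA
  rw [hres, pvMiss_loop rk.values (PySem.Dict.mk (S.map (fun key => (key, pvGroupJoin pairs key))))]
  simp [List.map_map, Function.comp_def]
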